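-- pv_equiv track=rewrite | github.com/richard-frink/advent-of-code | 2022/solutions/d7.py | get_sized_directories
-- ===== SOURCE A (Python) =====
-- def add_path_to_directories(path, directories):
--     if path not in directories.keys():
--         directories[path] = 0
--     return directories
--
-- def get_sized_directories(command_lines):
--     directories_size = {}
--     current_stack = []
--     current_path = ""
--     for line in command_lines:
--         if line.startswith("$ cd"):
--             # maintaining directories list
--             if not line.startswith("$ cd ..") and not line.startswith("$ cd /"):
--                 current_path += f"/{line.split()[-1]}" if current_path != "/" else line.split()[-1]
--                 current_stack.append(current_path)
--                 directories_size = add_path_to_directories(current_path, directories_size)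
--             # maintaining directories list
--             elif line.strip() == "$ cd /":
--                 current_path = "/"
--                 current_stack = ["/"]
--                 directories_size = add_path_to_directories(current_path, directories_size)
--             # maintaining directories list
--             elif line.strip() == "$ cd ..":
--                 current_path = "/".join(current_path.split("/")[:-1])
--                 current_stack.pop()
--         if line[0].isdigit():
--             file_size = int(line.split()[0])
--             # this will maintain a running list of all files per every possible directory path
--             for directory in current_stack:
--                 directories_size[directory] += file_size
--     return directories_size
-- ===== SOURCE B (Python) =====
-- def get_sized_directories(command_lines):
--     # Deferred-propagation rewrite: each file size is added once, to the top of the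
--     # stack; a directory's accumulated subtree size is pushed down to its parent
--     # (and into the totals dict) only when it is popped (one dict update per file/pop).
--     totals = {}
--     stack = []  # entries [path, accumulated_size]; top of stack at the end
--     current_path = ""
--
--     def settle_all():
--         # pop every open directory, folding its subtree size into its parent
--         while stack:
--             path, acc = stack.pop()
--             totals[path] = totals.get(path, 0) + acc
--             if stack:
--                 stack[-1][1] += acc
--
--     for line in command_lines:
--         if line.startswith("$ cd"):
--             if not line.startswith("$ cd ..") and not line.startswith("$ cd /"):
--                 current_path += f"/{line.split()[-1]}" if current_path != "/" else line.split()[-1]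
--                 if current_path not in totals:
--                     totals[current_path] = 0
--                 stack.append([current_path, 0])
--             elif line.strip() == "$ cd /":
--                 settle_all()
--                 current_path = "/"
--                 if "/" not in totals:
--                     totals["/"] = 0
--                 stack.append(["/", 0])
--             elif line.strip() == "$ cd ..":
--                 current_path = "/".join(current_path.split("/")[:-1])
--                 path, acc = stack.pop()
--                 totals[path] = totals.get(path, 0) + acc
--                 if stack:
--                     stack[-1][1] += acc
--         if line[0].isdigit():
--             if stack:
--                 stack[-1][1] += int(line.split()[0])
--     settle_all()
--     return totals
-- ===== Notes on version B (the rewrite author's own statement) =====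
-- stated objective: alternative
-- what changed: A adds every file size to every directory on the current stack (one dict update per stack entry per file); B keeps a (path, subtree-size) accumulator per open directory, adds each file size once to the top of the stack, and propagates a directory's accumulated total to its parent and into the totals dict only when the directory is popped (or at the final flush).
import Mathlib
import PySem

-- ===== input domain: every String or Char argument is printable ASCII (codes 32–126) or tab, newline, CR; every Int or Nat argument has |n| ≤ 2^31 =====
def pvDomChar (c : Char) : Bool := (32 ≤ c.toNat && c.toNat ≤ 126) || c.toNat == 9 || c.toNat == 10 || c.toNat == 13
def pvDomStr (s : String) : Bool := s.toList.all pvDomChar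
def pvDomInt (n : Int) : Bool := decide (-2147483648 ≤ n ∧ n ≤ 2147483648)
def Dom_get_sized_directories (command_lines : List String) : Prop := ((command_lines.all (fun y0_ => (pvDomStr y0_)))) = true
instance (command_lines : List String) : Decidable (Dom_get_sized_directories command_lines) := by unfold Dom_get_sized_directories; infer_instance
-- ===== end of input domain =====

-- B replaces A's per-file walk over the whole directory stack by a deferred-propagation
-- stack of (path, subtree-size) accumulators settled on pop (one dict update per file/pop).


-- ===== PORT A =====
-- shared transliterations of sub-expressions both Pythons contain verbatim
def pvLastTok (line : String) : String := PySem.List.pyGetD (PySem.Str.split₀ line) (-1) ""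
def pvFirstTok (line : String) : String := PySem.List.pyGetD (PySem.Str.split₀ line) 0 ""
def pvNewPath (path line : String) : String :=
  path ++ (if path ≠ "/" then "/" ++ pvLastTok line else pvLastTok line)
def pvParent (path : String) : String :=
  PySem.Str.join "/" (PySem.List.slice ((PySem.Str.split? path "/").getD []) none (some (-1)))
def pvIsDigitLine (line : String) : Bool :=
  match PySem.Str.pyGet? line 0 with
  | some c => PySem.Chars.isdigit c
  | none => false   -- Python raises IndexError on "" (excluded by Pre_)
def pvSize (line : String) : Int := (PySem.Int.ofStr? (pvFirstTok line)).getD 0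
-- add_path_to_directories
def pvReg (p : String) (d : PySem.Dict String Int) : PySem.Dict String Int :=
  if d.contains p then d else d.insert p 0

def pvStepA (st : PySem.Dict String Int × List String × String) (line : String) :
    PySem.Dict String Int × List String × String :=
  let mid : PySem.Dict String Int × List String × String :=
    if PySem.Str.startswith line "$ cd" then
      if !PySem.Str.startswith line "$ cd .." && !PySem.Str.startswith line "$ cd /" then
        (pvReg (pvNewPath st.2.2 line) st.1, st.2.1 ++ [pvNewPath st.2.2 line], pvNewPath st.2.2 line)
      else if PySem.Str.strip line = "$ cd /" then
        (pvReg "/" st.1, ["/"], "/")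
      else if PySem.Str.strip line = "$ cd .." then
        (st.1, st.2.1.dropLast, pvParent st.2.2)   -- list.pop() raises on []: excluded by Pre_
      else st
    else st
  if pvIsDigitLine line then
    (mid.2.1.foldl (fun d q => d.insert q (d.getD q 0 + pvSize line)) mid.1, mid.2.1, mid.2.2)
  else mid

def get_sized_directories (command_lines : List String) : List (String × Int) :=
  (command_lines.foldl pvStepA (PySem.Dict.empty, [], "")).1.items

-- ===== PORT B =====
def pvAddD (d : PySem.Dict String Int) (p : String) (x : Int) : PySem.Dict String Int :=
  d.insert p (d.getD p 0 + x)   -- totals[p] = totals.get(p, 0) + x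

-- stack[-1][1] += x  (top of the stack is the HEAD here)
def pvBump (stk : List (String × Int)) (x : Int) : List (String × Int) :=
  match stk with
  | [] => []
  | (q, b) :: t => (q, b + x) :: t

-- settle_all: pop every open directory, folding its subtree size into its parent
def pvSettle (stk : List (String × Int)) (d : PySem.Dict String Int) : PySem.Dict String Int :=
  match stk with
  | [] => d
  | [(p, a)] => pvAddD d p a
  | (p, a) :: (q, b) :: t => pvSettle ((q, b + a) :: t) (pvAddD d p a)
  termination_by stk.length
  decreasing_by simp

def pvStepB (st : PySem.Dict String Int × List (String × Int) × String) (line : String) :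
    PySem.Dict String Int × List (String × Int) × String :=
  let mid : PySem.Dict String Int × List (String × Int) × String :=
    if PySem.Str.startswith line "$ cd" then
      if !PySem.Str.startswith line "$ cd .." && !PySem.Str.startswith line "$ cd /" then
        (pvReg (pvNewPath st.2.2 line) st.1, (pvNewPath st.2.2 line, 0) :: st.2.1, pvNewPath st.2.2 line)
      else if PySem.Str.strip line = "$ cd /" then
        (pvReg "/" (pvSettle st.2.1 st.1), [("/", 0)], "/")
      else if PySem.Str.strip line = "$ cd .." then
        match st.2.1 with
        | [] => (st.1, [], pvParent st.2.2)         -- Python raises here: excluded by Pre_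
        | (p, a) :: rest => (pvAddD st.1 p a, pvBump rest a, pvParent st.2.2)
      else st
    else st
  if pvIsDigitLine line then (mid.1, pvBump mid.2.1 (pvSize line), mid.2.2)
  else mid

def get_sized_directories_alt (command_lines : List String) : List (String × Int) :=
  let st := command_lines.foldl pvStepB (PySem.Dict.empty, [], "")
  (pvSettle st.2.1 st.1).items

-- ===== PRECONDITION & SPEC =====
-- depth of the directory stack A maintains (none = pop from an empty stack, where A raises)
def pvDepthStep (o : Option Nat) (line : String) : Option Nat :=
  match o with
  | none => none
  | some n =>
    if PySem.Str.startswith line "$ cd" then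
      if !PySem.Str.startswith line "$ cd .." && !PySem.Str.startswith line "$ cd /" then some (n + 1)
      else if PySem.Str.strip line = "$ cd /" then some 1
      else if PySem.Str.strip line = "$ cd .." then
        match n with | 0 => none | Nat.succ m => some m
      else some n
    else some n

def pvLineOk (line : String) : Bool :=
  (line != "") && (!(pvIsDigitLine line) || (PySem.Int.ofStr? (pvFirstTok line)).isSome)

-- Pre_ excludes exactly the inputs where the Python A raises: an empty line (IndexError at
-- line[0]), a digit-leading line whose first token is not an int literal (ValueError), and a
-- "$ cd .." issued with no open directory (IndexError: pop from empty list).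
def Pre_get_sized_directories (command_lines : List String) : Prop :=
  (command_lines.foldl pvDepthStep (some 0)).isSome = true ∧
  command_lines.all pvLineOk = true
instance (command_lines : List String) : Decidable (Pre_get_sized_directories command_lines) := by
  unfold Pre_get_sized_directories; infer_instance

def pvWitness_get_sized_directories : List String :=
  ["$ cd /", "$ cd a", "10 f.txt", "$ cd ..", "3 g"]

def Spec_get_sized_directories (command_lines : List String) (out : List (String × Int)) : Prop := out = get_sized_directories_alt command_lines
instance (command_lines : List String) (out : List (String × Int)) : Decidable (Spec_get_sized_directories command_lines out) := by unfold Spec_get_sized_directories; infer_instance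

-- ===== CLAIM (what is proved, stated in full; the proofs are below) =====
def Claim_equal_get_sized_directories : Prop := ∀ (command_lines : List String), Dom_get_sized_directories command_lines → Pre_get_sized_directories command_lines → Spec_get_sized_directories command_lines (get_sized_directories command_lines)

-- ===== LEMMAS AND PROOFS =====
-- every stack entry's path is a key of the dict
def pvGood (stk : List (String × Int)) (d : PySem.Dict String Int) : Prop :=
  ∀ e ∈ stk, d.contains e.1 = true

def pvAddList (ps : List String) (s : Int) (D : PySem.Dict String Int) : PySem.Dict String Int :=
  ps.foldl (fun d q => d.insert q (d.getD q 0 + s)) D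

-- the invariant tying A's loop state to B's
def pvInv (a : PySem.Dict String Int × List String × String)
    (b : PySem.Dict String Int × List (String × Int) × String) : Prop :=
  a.1 = pvSettle b.2.1 b.1 ∧ a.2.1 = (b.2.1.map Prod.fst).reverse ∧ a.2.2 = b.2.2 ∧
  pvGood b.2.1 b.1 ∧ b.1.keys.Nodup

lemma pvBump_zero (st : List (String × Int)) : pvBump st 0 = st := by
  cases st with
  | nil => rfl
  | cons h t => cases h; simp [pvBump]

lemma pvBump_length (st : List (String × Int)) (x : Int) : (pvBump st x).length = st.length := by
  cases st with
  | nil => rfl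
  | cons h t => cases h; simp [pvBump]

lemma pvBump_map_fst (st : List (String × Int)) (x : Int) :
    (pvBump st x).map Prod.fst = st.map Prod.fst := by
  cases st with
  | nil => rfl
  | cons h t => cases h; simp [pvBump]

lemma pvSettle_nil (d : PySem.Dict String Int) : pvSettle [] d = d := by simp [pvSettle]

lemma pvSettle_cons (p : String) (a : Int) (rest : List (String × Int))
    (d : PySem.Dict String Int) :
    pvSettle ((p, a) :: rest) d = pvSettle (pvBump rest a) (pvAddD d p a) := by
  cases rest with
  | nil => simp [pvSettle, pvBump, pvAddD]
  | cons h t => cases h; simp [pvSettle, pvBump]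

lemma contains_pvAddD (d : PySem.Dict String Int) (p r : String) (x : Int) :
    (pvAddD d p x).contains r = (r == p || d.contains r) := by
  simp [pvAddD, PySem.Dict.contains_insert]

lemma contains_pvAddD_of (d : PySem.Dict String Int) (p r : String) (x : Int)
    (h : d.contains r = true) : (pvAddD d p x).contains r = true := by
  simp [contains_pvAddD, h]

lemma nodup_pvAddD (d : PySem.Dict String Int) (p : String) (x : Int)
    (h : d.keys.Nodup) : (pvAddD d p x).keys.Nodup :=
  PySem.Dict.nodup_keys_insert d p _ h

lemma pvAddD_self_assoc (d : PySem.Dict String Int) (p : String) (x y : Int) :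
    pvAddD (pvAddD d p x) p y = pvAddD d p (x + y) := by
  simp [pvAddD, PySem.Dict.insert_insert_self, PySem.Dict.getD_insert_self, add_assoc]

lemma pvInsert_comm_of_contains (d : PySem.Dict String Int) (p q : String) (v w : Int)
    (hne : p ≠ q) (hp : d.contains p = true) (hq : d.contains q = true) :
    (d.insert p v).insert q w = (d.insert q w).insert p v := by
  have hq' : (d.insert p v).contains q = true := by
    simp [PySem.Dict.contains_insert, hq]
  have hp' : (d.insert q w).contains p = true := by
    simp [PySem.Dict.contains_insert, hp]
  apply PySem.Dict.ext
  rw [PySem.Dict.items_insert_of_contains _ w hq', PySem.Dict.items_insert_of_contains _ v hp,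
    PySem.Dict.items_insert_of_contains _ v hp', PySem.Dict.items_insert_of_contains _ w hq,
    List.map_map, List.map_map]
  refine List.map_congr_left ?_
  intro r _
  by_cases h1 : r.1 = p
  · simp [Function.comp, h1, hne]
  · by_cases h2 : r.1 = q
    · simp [Function.comp, h2, Ne.symm hne]
    · simp [Function.comp, h1, h2]

lemma pvInsert_comm_of_fresh (d : PySem.Dict String Int) (p q : String) (v w : Int)
    (hp : d.contains p = false) (hq : d.contains q = true) :
    (d.insert p v).insert q w = (d.insert q w).insert p v := by
  have hne : p ≠ q := by rintro rfl; rw [hp] at hq; exact Bool.false_ne_true hq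
  have hq' : (d.insert p v).contains q = true := by
    simp [PySem.Dict.contains_insert, hq]
  have hp' : (d.insert q w).contains p = false := by
    simp [PySem.Dict.contains_insert, hp, hne]
  apply PySem.Dict.ext
  rw [PySem.Dict.items_insert_of_contains _ w hq',
    PySem.Dict.items_insert_of_not_contains _ v hp,
    PySem.Dict.items_insert_of_not_contains _ v hp',
    PySem.Dict.items_insert_of_contains _ w hq]
  simp [hne]

lemma pvAddD_comm (d : PySem.Dict String Int) (p q : String) (x y : Int)
    (hp : d.contains p = true) (hq : d.contains q = true) :
    pvAddD (pvAddD d p x) q y = pvAddD (pvAddD d q y) p x := by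
  by_cases hpq : p = q
  · subst hpq
    rw [pvAddD_self_assoc, pvAddD_self_assoc, add_comm]
  · show (d.insert p (d.getD p 0 + x)).insert q ((pvAddD d p x).getD q 0 + y) = _
    show _ = (d.insert q (d.getD q 0 + y)).insert p ((pvAddD d q y).getD p 0 + x)
    have e1 : (pvAddD d p x).getD q 0 = d.getD q 0 :=
      PySem.Dict.getD_insert_of_ne d _ 0 (fun h => hpq h.symm)
    have e2 : (pvAddD d q y).getD p 0 = d.getD p 0 :=
      PySem.Dict.getD_insert_of_ne d _ 0 hpq
    rw [e1, e2]
    exact pvInsert_comm_of_contains d p q _ _ hpq hp hq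

lemma pvMapSelf_aux (p : String) : ∀ (l : List (String × Int)),
    (l.map Prod.fst).Nodup →
    l.map (fun r => if r.1 == p then (p, (PySem.Dict.mk l).getD p 0) else r) = l := by
  intro l
  induction l with
  | nil => intro _; rfl
  | cons h t ih =>
    obtain ⟨k, v⟩ := h
    intro hnd
    rw [List.map_cons] at hnd
    obtain ⟨hkt, hnd2⟩ := List.nodup_cons.1 hnd
    by_cases hk : k = p
    · subst hk
      have hval : (PySem.Dict.mk ((k, v) :: t)).getD k 0 = v := by
        rw [PySem.Dict.getD_eq_get?_getD, PySem.Dict.get?_mk_cons]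
        simp
      have hnot : ∀ r ∈ t, r.1 ≠ k := by
        intro r hr hrk
        exact hkt (by simpa [hrk] using List.mem_map_of_mem (f := Prod.fst) hr)
      have h2 : t.map (fun r => if r.1 == k then (k, v) else r) = t := by
        have := List.map_congr_left (l := t)
          (f := fun r => if r.1 == k then (k, v) else r) (g := id)
          (fun r hr => by simp [hnot r hr])
        simpa using this
      simp only [List.map_cons, hval, h2]
      simp
    · have hval : (PySem.Dict.mk ((k, v) :: t)).getD p 0 = (PySem.Dict.mk t).getD p 0 := by
        rw [PySem.Dict.getD_eq_get?_getD, PySem.Dict.get?_mk_cons, PySem.Dict.getD_eq_get?_getD]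
        simp [hk]
      simp only [List.map_cons, hval, ih hnd2]
      simp [hk]

lemma pvInsert_self_value (d : PySem.Dict String Int) (p : String)
    (hp : d.contains p = true) (hnd : d.keys.Nodup) : d.insert p (d.getD p 0) = d := by
  obtain ⟨l⟩ := d
  apply PySem.Dict.ext
  rw [PySem.Dict.items_insert_of_contains _ _ hp]
  show l.map _ = l
  exact pvMapSelf_aux p l (by simpa [PySem.Dict.keys_mk] using hnd)

lemma pvAddD_zero (d : PySem.Dict String Int) (p : String)
    (hp : d.contains p = true) (hnd : d.keys.Nodup) : pvAddD d p 0 = d := by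
  show d.insert p (d.getD p 0 + 0) = d
  rw [add_zero]
  exact pvInsert_self_value d p hp hnd

lemma pvGood_step (st : List (String × Int)) (d : PySem.Dict String Int) (p : String) (a x : Int)
    (h : pvGood ((p, a) :: st) d) : pvGood (pvBump st x) (pvAddD d p a) := by
  intro e he
  cases st with
  | nil => simp [pvBump] at he
  | cons h' t =>
    obtain ⟨q, b⟩ := h'
    simp only [pvBump] at he
    apply contains_pvAddD_of
    rcases List.mem_cons.1 he with h1 | h1
    · subst h1; exact h (q, b) (by simp)
    · exact h e (by simp [h1])

lemma contains_pvSettle (st : List (String × Int)) (d : PySem.Dict String Int)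
    (hG : pvGood st d) (r : String) : (pvSettle st d).contains r = d.contains r := by
  induction hn : st.length generalizing st d with
  | zero => rw [List.length_eq_zero_iff.1 hn, pvSettle_nil]
  | succ n ih =>
    cases st with
    | nil => simp at hn
    | cons h rest =>
      obtain ⟨p, a⟩ := h
      have hp : d.contains p = true := hG (p, a) (by simp)
      rw [pvSettle_cons, ih (pvBump rest a) (pvAddD d p a) (pvGood_step rest d p a a hG)
        (by rw [pvBump_length]; simpa using hn), contains_pvAddD]
      by_cases hr : r = p
      · subst hr; simp [hp]
      · simp [hr]

lemma nodup_pvSettle (st : List (String × Int)) (d : PySem.Dict String Int)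
    (hnd : d.keys.Nodup) : (pvSettle st d).keys.Nodup := by
  induction hn : st.length generalizing st d with
  | zero => rw [List.length_eq_zero_iff.1 hn, pvSettle_nil]; exact hnd
  | succ n ih =>
    cases st with
    | nil => simp at hn
    | cons h rest =>
      obtain ⟨p, a⟩ := h
      rw [pvSettle_cons]
      exact ih (pvBump rest a) (pvAddD d p a) (nodup_pvAddD d p a hnd)
        (by rw [pvBump_length]; simpa using hn)

lemma pvSettle_pvAddD (st : List (String × Int)) (d : PySem.Dict String Int) (p : String) (x : Int)
    (hp : d.contains p = true) (hG : pvGood st d) :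
    pvSettle st (pvAddD d p x) = pvAddD (pvSettle st d) p x := by
  induction hn : st.length generalizing st d with
  | zero => rw [List.length_eq_zero_iff.1 hn, pvSettle_nil, pvSettle_nil]
  | succ n ih =>
    cases st with
    | nil => simp at hn
    | cons h rest =>
      obtain ⟨q, a⟩ := h
      have hq : d.contains q = true := hG (q, a) (by simp)
      rw [pvSettle_cons, pvSettle_cons, pvAddD_comm d p q x a hp hq]
      exact ih (pvBump rest a) (pvAddD d q a) (contains_pvAddD_of d q p a hp)
        (pvGood_step rest d q a a hG) (by rw [pvBump_length]; simpa using hn)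

lemma pvAddD_insert_fresh (d : PySem.Dict String Int) (p q : String) (a : Int)
    (hp : d.contains p = false) (hq : d.contains q = true) :
    pvAddD (d.insert p 0) q a = (pvAddD d q a).insert p 0 := by
  have hne : q ≠ p := by rintro rfl; rw [hp] at hq; exact Bool.false_ne_true hq
  show (d.insert p 0).insert q ((d.insert p 0).getD q 0 + a) = _
  rw [PySem.Dict.getD_insert_of_ne d 0 0 hne]
  exact (pvInsert_comm_of_fresh d p q 0 _ hp hq)

lemma pvSettle_insert_fresh (st : List (String × Int)) (d : PySem.Dict String Int) (p : String)
    (hp : d.contains p = false) (hG : pvGood st d) :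
    pvSettle st (d.insert p 0) = (pvSettle st d).insert p 0 := by
  induction hn : st.length generalizing st d with
  | zero => rw [List.length_eq_zero_iff.1 hn, pvSettle_nil, pvSettle_nil]
  | succ n ih =>
    cases st with
    | nil => simp at hn
    | cons h rest =>
      obtain ⟨q, a⟩ := h
      have hq : d.contains q = true := hG (q, a) (by simp)
      have hne : p ≠ q := by rintro rfl; rw [hp] at hq; exact Bool.false_ne_true hq
      rw [pvSettle_cons, pvSettle_cons, pvAddD_insert_fresh d p q a hp hq]
      exact ih (pvBump rest a) (pvAddD d q a)
        (by rw [contains_pvAddD]; simp [hne, hp])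
        (pvGood_step rest d q a a hG) (by rw [pvBump_length]; simpa using hn)

lemma pvAddList_nil (s : Int) (D : PySem.Dict String Int) : pvAddList [] s D = D := rfl

lemma pvAddList_cons (q : String) (L : List String) (s : Int) (D : PySem.Dict String Int) :
    pvAddList (q :: L) s D = pvAddList L s (pvAddD D q s) := rfl

lemma pvAddList_out (L : List String) (s : Int) (D : PySem.Dict String Int) (p : String) (x : Int)
    (hp : D.contains p = true) (hL : ∀ q ∈ L, D.contains q = true) :
    pvAddList L s (pvAddD D p x) = pvAddD (pvAddList L s D) p x := by
  induction L generalizing D with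
  | nil => rfl
  | cons q L ih =>
    rw [pvAddList_cons, pvAddList_cons, pvAddD_comm D p q x s hp (hL q (by simp))]
    exact ih (pvAddD D q s) (contains_pvAddD_of D q p s hp)
      (fun r hr => contains_pvAddD_of D q r s (hL r (by simp [hr])))

lemma pvAddList_reverse (L : List String) (s : Int) (D : PySem.Dict String Int)
    (hL : ∀ q ∈ L, D.contains q = true) :
    pvAddList L.reverse s D = pvAddList L s D := by
  induction L generalizing D with
  | nil => rfl
  | cons q L ih =>
    have hq : D.contains q = true := hL q (by simp)
    have hL' : ∀ r ∈ L, D.contains r = true := fun r hr => hL r (by simp [hr])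
    rw [List.reverse_cons]
    show (L.reverse ++ [q]).foldl _ D = _
    rw [List.foldl_append]
    show pvAddD (pvAddList L.reverse s D) q s = _
    rw [ih D hL', pvAddList_cons, pvAddList_out L s D q s hq hL']

lemma pvGood_bump (st : List (String × Int)) (d : PySem.Dict String Int) (s : Int)
    (h : pvGood st d) : pvGood (pvBump st s) d := by
  cases st with
  | nil => intro e he; simp [pvBump] at he
  | cons h2 t =>
    obtain ⟨q, b⟩ := h2
    intro e he
    simp only [pvBump] at he
    rcases List.mem_cons.1 he with h1 | h1
    · subst h1; exact h (q, b) (by simp)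
    · exact h e (by simp [h1])

lemma pvSettle_bump (st : List (String × Int)) (d : PySem.Dict String Int) (s : Int)
    (hG : pvGood st d) :
    pvSettle (pvBump st s) d = pvAddList (st.map Prod.fst) s (pvSettle st d) := by
  induction hn : st.length generalizing st d with
  | zero => rw [List.length_eq_zero_iff.1 hn]; rfl
  | succ n ih =>
    cases st with
    | nil => simp at hn
    | cons h rest =>
      obtain ⟨p, a⟩ := h
      have hp : d.contains p = true := hG (p, a) (by simp)
      cases rest with
      | nil =>
        show pvSettle [(p, a + s)] d = pvAddList [p] s (pvSettle [(p, a)] d)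
        rw [pvSettle_cons, pvSettle_cons]
        simp only [pvBump, pvSettle_nil, pvAddList_cons, pvAddList_nil]
        rw [pvAddD_self_assoc]
      | cons h2 t =>
        obtain ⟨q, b⟩ := h2
        have hGqt : pvGood ((q, b + a) :: t) (pvAddD d p a) := pvGood_step _ d p a a hG
        have hfst : ∀ r ∈ ((q, b) :: t).map Prod.fst, (pvAddD d p a).contains r = true := by
          intro r hr
          rcases List.mem_map.1 hr with ⟨e, he, rfl⟩
          exact contains_pvAddD_of d p e.1 a (hG e (by simp [he]))
        have key : pvBump ((p, a) :: (q, b) :: t) s = (p, a + s) :: (q, b) :: t := rfl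
        rw [key, pvSettle_cons]
        have e1 : pvBump ((q, b) :: t) (a + s) = pvBump ((q, b + a) :: t) s := by
          show (q, b + (a + s)) :: t = (q, b + a + s) :: t
          rw [add_assoc]
        have e2 : pvAddD d p (a + s) = pvAddD (pvAddD d p a) p s := (pvAddD_self_assoc d p a s).symm
        rw [e1, e2]
        rw [pvSettle_pvAddD (pvBump ((q, b + a) :: t) s) (pvAddD d p a) p s
          (contains_pvAddD_of d p p a hp) (pvGood_bump _ _ s hGqt)]
        rw [ih ((q, b + a) :: t) (pvAddD d p a) hGqt (by simpa using hn)]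
        have e3 : ((q, b + a) :: t).map Prod.fst = ((q, b) :: t).map Prod.fst := rfl
        rw [e3]
        have hpE : (pvSettle ((q, b + a) :: t) (pvAddD d p a)).contains p = true := by
          rw [contains_pvSettle _ _ hGqt]
          exact contains_pvAddD_of d p p a hp
        have hLE : ∀ r ∈ ((q, b) :: t).map Prod.fst,
            (pvSettle ((q, b + a) :: t) (pvAddD d p a)).contains r = true := by
          intro r hr
          rw [contains_pvSettle _ _ hGqt]
          exact hfst r hr
        rw [← pvAddList_out _ s _ p s hpE hLE]
        show _ = pvAddList (p :: ((q, b) :: t).map Prod.fst) s (pvSettle ((p, a) :: (q, b) :: t) d)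
        rw [pvAddList_cons]
        congr 2
        rw [pvSettle_cons p a ((q, b) :: t) d]
        rfl

lemma pvDepth_none (lines : List String) : lines.foldl pvDepthStep none = none := by
  induction lines with
  | nil => rfl
  | cons l t ih => simpa [pvDepthStep] using ih

lemma pvSettle_singleton (p : String) (a : Int) (d : PySem.Dict String Int) :
    pvSettle [(p, a)] d = pvAddD d p a := by simp [pvSettle]

lemma contains_pvReg_self (p : String) (d : PySem.Dict String Int) :
    (pvReg p d).contains p = true := by
  unfold pvReg
  split
  · assumption
  · simp

lemma contains_pvReg_of (p r : String) (d : PySem.Dict String Int)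
    (h : d.contains r = true) : (pvReg p d).contains r = true := by
  unfold pvReg
  split
  · exact h
  · simp [PySem.Dict.contains_insert, h]

lemma nodup_pvReg (p : String) (d : PySem.Dict String Int)
    (h : d.keys.Nodup) : (pvReg p d).keys.Nodup := by
  unfold pvReg
  split
  · exact h
  · exact PySem.Dict.nodup_keys_insert d p 0 h

lemma pvInv_digit (line : String) (d : PySem.Dict String Int) (st : List (String × Int))
    (P : String) (hG : pvGood st d) (hnd : d.keys.Nodup) :
    pvInv ((st.map Prod.fst).reverse.foldl
        (fun dd q => dd.insert q (dd.getD q 0 + pvSize line)) (pvSettle st d),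
      (st.map Prod.fst).reverse, P)
      (d, pvBump st (pvSize line), P) := by
  refine ⟨?_, by simp [pvBump_map_fst], rfl, pvGood_bump st d _ hG, hnd⟩
  show pvAddList (st.map Prod.fst).reverse (pvSize line) (pvSettle st d)
      = pvSettle (pvBump st (pvSize line)) d
  rw [pvAddList_reverse _ _ _ (fun q hq => by
        rw [contains_pvSettle st d hG]
        rcases List.mem_map.1 hq with ⟨e, he, rfl⟩
        exact hG e he)]
  exact (pvSettle_bump st d _ hG).symm

lemma pvInv_post (line : String) (Y : PySem.Dict String Int) (stY : List (String × Int))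
    (P : String) (hG : pvGood stY Y) (hnd : Y.keys.Nodup) :
    pvInv (if pvIsDigitLine line then
        (((stY.map Prod.fst).reverse).foldl
          (fun dd q => dd.insert q (dd.getD q 0 + pvSize line)) (pvSettle stY Y),
         (stY.map Prod.fst).reverse, P)
      else (pvSettle stY Y, (stY.map Prod.fst).reverse, P))
      (if pvIsDigitLine line then (Y, pvBump stY (pvSize line), P) else (Y, stY, P)) ∧
    ((if pvIsDigitLine line then (Y, pvBump stY (pvSize line), P)
      else (Y, stY, P)) : PySem.Dict String Int × List (String × Int) × String).2.1.length
      = stY.length := by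
  by_cases h5 : pvIsDigitLine line = true
  · simp only [h5, if_true]
    exact ⟨pvInv_digit line Y stY P hG hnd, by simp [pvBump_length]⟩
  · simp only [if_neg h5]
    refine ⟨⟨rfl, rfl, rfl, hG, hnd⟩, ?_⟩
    simp

-- one step of both loops preserves the invariant (and matches the depth bookkeeping)
lemma pvStep_inv (line : String) (dB : PySem.Dict String Int) (stB : List (String × Int))
    (pB : String)
    (hd : (pvDepthStep (some stB.length) line).isSome = true)
    (hG : pvGood stB dB) (hnd : dB.keys.Nodup) :
    pvInv (pvStepA (pvSettle stB dB, (stB.map Prod.fst).reverse, pB) line)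
        (pvStepB (dB, stB, pB) line) ∧
    pvDepthStep (some stB.length) line = some ((pvStepB (dB, stB, pB) line).2.1.length) := by
  by_cases h1 : PySem.Str.startswith line "$ cd" = true
  · by_cases h2 : (!PySem.Str.startswith line "$ cd .." && !PySem.Str.startswith line "$ cd /") = true
    · -- push branch
      have hrw : pvReg (pvNewPath pB line) (pvSettle stB dB)
          = pvSettle ((pvNewPath pB line, 0) :: stB) (pvReg (pvNewPath pB line) dB) := by
        have base : pvSettle ((pvNewPath pB line, 0) :: stB) (pvReg (pvNewPath pB line) dB)
            = pvSettle stB (pvReg (pvNewPath pB line) dB) := by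
          rw [pvSettle_cons, pvBump_zero]
          congr 1
          exact pvAddD_zero _ _ (contains_pvReg_self _ dB) (nodup_pvReg _ dB hnd)
        rw [base]
        unfold pvReg
        by_cases hc : dB.contains (pvNewPath pB line) = true
        · have hcS : (pvSettle stB dB).contains (pvNewPath pB line) = true := by
            rw [contains_pvSettle stB dB hG]; exact hc
          rw [if_pos hcS, if_pos hc]
        · rw [Bool.not_eq_true] at hc
          have hcS : ¬((pvSettle stB dB).contains (pvNewPath pB line) = true) := by
            rw [contains_pvSettle stB dB hG]; simp [hc]
          rw [if_neg hcS, if_neg (by simp [hc])]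
          exact (pvSettle_insert_fresh stB dB _ hc hG).symm
      have hG' : pvGood ((pvNewPath pB line, 0) :: stB) (pvReg (pvNewPath pB line) dB) := by
        intro e he
        rcases List.mem_cons.1 he with h | h
        · subst h; exact contains_pvReg_self _ dB
        · exact contains_pvReg_of _ _ dB (hG e h)
      have hnd' := nodup_pvReg (pvNewPath pB line) dB hnd
      have hstk : (stB.map Prod.fst).reverse ++ [pvNewPath pB line]
          = (((pvNewPath pB line, 0) :: stB).map Prod.fst).reverse := by simp
      constructor
      · simp only [pvStepA, pvStepB, h1, h2, if_true, hrw, hstk]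
        exact (pvInv_post line _ _ _ hG' hnd').1
      · simp only [pvStepB, h1, h2, if_true]
        simp only [pvDepthStep]
        simp only [h1, h2, if_true]
        rw [(pvInv_post line _ _ _ hG' hnd').2]
        simp
    · rw [Bool.not_eq_true] at h2
      by_cases h3 : PySem.Str.strip line = "$ cd /"
      · -- cd / branch
        have hndS : (pvSettle stB dB).keys.Nodup := nodup_pvSettle stB dB hnd
        have hrw : pvReg "/" (pvSettle stB dB)
            = pvSettle [("/", 0)] (pvReg "/" (pvSettle stB dB)) := by
          rw [pvSettle_singleton]
          exact (pvAddD_zero _ _ (contains_pvReg_self _ _) (nodup_pvReg _ _ hndS)).symm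
        have hG' : pvGood [("/", 0)] (pvReg "/" (pvSettle stB dB)) := by
          intro e he
          rcases List.mem_cons.1 he with h | h
          · subst h; exact contains_pvReg_self _ _
          · cases h
        have hnd' := nodup_pvReg "/" (pvSettle stB dB) hndS
        have hstk : (["/"] : List String) = ([(("/" : String), (0 : Int))].map Prod.fst).reverse := rfl
        constructor
        · simp only [pvStepA, pvStepB, h1, if_true, h2, Bool.false_eq_true, if_false, if_pos h3]
          rw [hstk]
          conv_lhs => rw [hrw]
          exact (pvInv_post line _ _ _ hG' hnd').1
        · simp only [pvStepB, h1, if_true, h2, Bool.false_eq_true, if_false, if_pos h3]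
          simp only [pvDepthStep, h1, if_true, h2, Bool.false_eq_true, if_false, if_pos h3]
          rw [(pvInv_post line _ _ _ hG' hnd').2]
          rfl
      · by_cases h4 : PySem.Str.strip line = "$ cd .."
        · -- cd .. branch
          cases stB with
          | nil =>
            exfalso
            simp only [pvDepthStep, h1, if_true, h2, Bool.false_eq_true, if_false,
              if_neg h3, if_pos h4] at hd
            simp at hd
          | cons h rest =>
            obtain ⟨p, a⟩ := h
            have hG' : pvGood (pvBump rest a) (pvAddD dB p a) := pvGood_step rest dB p a a hG
            have hnd' := nodup_pvAddD dB p a hnd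
            have hdict : pvSettle ((p, a) :: rest) dB
                = pvSettle (pvBump rest a) (pvAddD dB p a) := pvSettle_cons p a rest dB
            have hstk : ((((p, a) :: rest).map Prod.fst).reverse).dropLast
                = ((pvBump rest a).map Prod.fst).reverse := by
              simp [pvBump_map_fst]
            constructor
            · simp only [pvStepA, pvStepB, h1, if_true, h2, Bool.false_eq_true, if_false,
                if_neg h3, if_pos h4, hstk]
              conv_lhs => rw [hdict]
              exact (pvInv_post line _ _ _ hG' hnd').1
            · simp only [pvStepB, h1, if_true, h2, Bool.false_eq_true, if_false,
                if_neg h3, if_pos h4]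
              simp only [pvDepthStep, h1, if_true, h2, Bool.false_eq_true, if_false,
                if_neg h3, if_pos h4, List.length_cons]
              rw [(pvInv_post line _ _ _ hG' hnd').2]
              simp [pvBump_length]
        · -- "$ cd" line in no recognised form: state unchanged
          constructor
          · simp only [pvStepA, pvStepB, h1, if_true, h2, Bool.false_eq_true, if_false,
              if_neg h3, if_neg h4]
            exact (pvInv_post line _ _ _ hG hnd).1
          · simp only [pvStepB, h1, if_true, h2, Bool.false_eq_true, if_false,
              if_neg h3, if_neg h4]
            simp only [pvDepthStep, h1, if_true, h2, Bool.false_eq_true, if_false,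
              if_neg h3, if_neg h4]
            rw [(pvInv_post line _ _ _ hG hnd).2]
  · -- not a cd line
    constructor
    · simp only [pvStepA, pvStepB, h1, Bool.false_eq_true, if_false]
      exact (pvInv_post line _ _ _ hG hnd).1
    · simp only [pvStepB, h1, Bool.false_eq_true, if_false]
      simp only [pvDepthStep]
      simp only [h1, Bool.false_eq_true, if_false]
      rw [(pvInv_post line _ _ _ hG hnd).2]

lemma pvMain (lines : List String) (a : PySem.Dict String Int × List String × String)
    (b : PySem.Dict String Int × List (String × Int) × String)
    (hI : pvInv a b)
    (hd : (lines.foldl pvDepthStep (some b.2.1.length)).isSome = true) :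
    pvInv (lines.foldl pvStepA a) (lines.foldl pvStepB b) := by
  induction lines generalizing a b with
  | nil => exact hI
  | cons l t ih =>
    obtain ⟨aD, aS, aP⟩ := a
    obtain ⟨bD, bS, bP⟩ := b
    obtain ⟨e1, e2, e3, hG, hnd⟩ := hI
    simp only at e1 e2 e3 hG hnd
    subst e1; subst e2; subst e3
    rw [List.foldl_cons, List.foldl_cons]
    have hd1 : (pvDepthStep (some bS.length) l).isSome = true := by
      by_contra hcon
      rw [Bool.not_eq_true, Option.isSome_eq_false_iff, Option.isNone_iff_eq_none] at hcon
      rw [List.foldl_cons, hcon, pvDepth_none] at hd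
      simp at hd
    obtain ⟨hstep, hlen⟩ := pvStep_inv l bD bS aP hd1 hG hnd
    apply ih _ _ hstep
    rw [List.foldl_cons, hlen] at hd
    exact hd

-- ===== VERDICT (by name: the statement is the Claim_ definition above) =====
theorem get_sized_directories_spec : Claim_equal_get_sized_directories := by
  intro lines _hdom hpre
  obtain ⟨hd, _hok⟩ := hpre
  have h0 : pvInv (PySem.Dict.empty, ([] : List String), "")
      (PySem.Dict.empty, ([] : List (String × Int)), "") := by
    refine ⟨(pvSettle_nil _).symm, rfl, rfl, ?_, ?_⟩
    · intro e he; cases he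
    · exact PySem.Dict.nodup_keys_empty
  have := pvMain lines _ _ h0 (by simpa using hd)
  unfold Spec_get_sized_directories get_sized_directories get_sized_directories_alt
  obtain ⟨h1, -, -, -, -⟩ := this
  simp only [h1]
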